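-- pv_equiv track=rewrite | github.com/Multu/vps | other/recursion/task6.py | even_index_values
-- ===== SOURCE A (Python) =====
-- def even_index_values(source):
--     if len(source) > 1:
--         even_index_items = even_index_values(source[2:])
--         even_index_items.insert(0, source[0])
--         return even_index_items
--     elif len(source) == 1:
--         return [source[0]]
--
--     return []
-- ===== SOURCE B (Python) =====
-- def even_index_values(source):
--     result = []
--     for i in range(0, len(source), 2):
--         result.append(source[i])
--     return result
-- ===== Notes on version B (the rewrite author's own statement) =====
-- stated objective: faster
-- what changed: Replaces the recursion on source[2:] with front insertion (quadratic from repeated slicing) by a single iterative index loop over range(0, len(source), 2) appending into an accumulator list.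
import Mathlib
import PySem

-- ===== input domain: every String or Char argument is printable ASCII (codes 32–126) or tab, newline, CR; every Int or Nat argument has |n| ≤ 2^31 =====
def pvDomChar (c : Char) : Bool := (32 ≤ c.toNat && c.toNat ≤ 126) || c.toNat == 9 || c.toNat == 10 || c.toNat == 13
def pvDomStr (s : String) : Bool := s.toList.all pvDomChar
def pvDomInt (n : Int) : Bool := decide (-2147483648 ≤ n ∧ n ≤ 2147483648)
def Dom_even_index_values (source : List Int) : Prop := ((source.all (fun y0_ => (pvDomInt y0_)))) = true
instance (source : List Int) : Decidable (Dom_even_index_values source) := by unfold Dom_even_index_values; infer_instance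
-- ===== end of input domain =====

-- B replaces A's recursion on source[2:] with an iterative loop over range(0, len(source), 2)
-- appending source[i] to an accumulator (a different decomposition; return value only).


-- ===== PORT A =====
def even_index_values (source : List Int) : List Int :=
  if h : source.length > 1 then
    let even_index_items := even_index_values (PySem.List.slice source (some 2) none)
    PySem.List.pyGetD source 0 0 :: even_index_items
  else if source.length = 1 then
    [PySem.List.pyGetD source 0 0]
  else
    []
termination_by source.length
decreasing_by
  rw [PySem.List.slice_from source (by norm_num : (0:Int) ≤ 2)]
  simp only [List.length_drop]
  omega

-- ===== PORT B =====
def even_index_values_alt (source : List Int) : List Int :=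
  (PySem.List.pyRange 0 (source.length : Int) 2).foldl
    (fun result i => result ++ [PySem.List.pyGetD source i 0]) []

-- ===== PRECONDITION & SPEC =====
def Spec_even_index_values (source : List Int) (out : List Int) : Prop := out = even_index_values_alt source
instance (source : List Int) (out : List Int) : Decidable (Spec_even_index_values source out) := by unfold Spec_even_index_values; infer_instance

-- ===== CLAIM (what is proved, stated in full; the proofs are below) =====
def Claim_equal_even_index_values : Prop := ∀ (source : List Int), Dom_even_index_values source → Spec_even_index_values source (even_index_values source)

-- ===== LEMMAS AND PROOFS =====

/-- Reference shape: take every second element, recursing two at a time. -/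
def evens : List Int → List Int
  | [] => []
  | [x] => [x]
  | x :: _ :: t => x :: evens t

lemma pyRange_two_cons (a b : Int) (h : a < b) :
    PySem.List.pyRange a b 2 = a :: PySem.List.pyRange (a + 2) b 2 := by
  rw [PySem.List.pyRange_of_pos _ _ (by norm_num : (0:Int) < 2),
      PySem.List.pyRange_of_pos _ _ (by norm_num : (0:Int) < 2)]
  have hn : (if a < b then ((b - a + 2 - 1) / 2).toNat else 0)
      = (if a + 2 < b then ((b - (a + 2) + 2 - 1) / 2).toNat else 0) + 1 := by
    split_ifs <;> omega
  rw [hn, List.range_succ_eq_map, List.map_cons, List.map_map]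
  congr 1
  · simp
  · congr 1
    funext k
    simp [Function.comp]
    ring

lemma A_eq_evens (s : List Int) : even_index_values s = evens s := by
  induction s using evens.induct with
  | case1 => simp [even_index_values, evens]
  | case2 x => simp [even_index_values, evens, PySem.List.pyGetD]
  | case3 x y t ih =>
      rw [even_index_values]
      have hl : (x :: y :: t).length > 1 := by simp
      rw [dif_pos hl]
      rw [PySem.List.slice_from _ (by norm_num : (0:Int) ≤ 2)]
      have h2i : ((2:Int)).toNat = 2 := rfl
      rw [h2i]
      simp only [List.drop_succ_cons, List.drop_zero]
      rw [ih]
      simp [evens, PySem.List.pyGetD]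

lemma B_aux (xs : List Int) (a : Nat) :
    (PySem.List.pyRange (a : Int) (xs.length : Int) 2).map (fun i => PySem.List.pyGetD xs i 0)
      = evens (xs.drop a) := by
  by_cases h : a < xs.length
  · rw [pyRange_two_cons _ _ (by exact_mod_cast h), List.map_cons]
    have hc : ((a : Int) + 2) = ((a + 2 : Nat) : Int) := by push_cast; ring
    rw [hc, B_aux xs (a + 2), PySem.List.pyGetD_natCast]
    cases e1 : xs.drop a with
    | nil =>
        exfalso
        have : (xs.drop a).length = xs.length - a := List.length_drop ..
        rw [e1] at this
        simp at this
        omega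
    | cons x rest =>
        have hx : xs.getD a 0 = x := by
          have hh : (xs.drop a).head? = xs[a]? := List.head?_drop
          rw [e1] at hh
          simp [List.getD, hh.symm]
        have h2 : xs.drop (a + 2) = rest.drop 1 := by
          have : xs.drop (a + 2) = (xs.drop a).drop 2 := by
            rw [List.drop_drop]
          rw [this, e1]
          simp
        rw [hx, h2]
        cases rest with
        | nil => simp [evens]
        | cons y t => simp [evens]
  · rw [PySem.List.pyRange_of_pos _ _ (by norm_num : (0:Int) < 2)]
    rw [if_neg (by exact_mod_cast h)]
    rw [List.drop_eq_nil_of_le (by omega)]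
    simp [evens]
termination_by xs.length - a
decreasing_by omega

-- ===== VERDICT (by name: the statement is the Claim_ definition above) =====
theorem even_index_values_spec : Claim_equal_even_index_values := by
  intro source _
  unfold Spec_even_index_values even_index_values_alt
  rw [PySem.List.foldl_append_singleton_eq_map, List.nil_append, A_eq_evens]
  have := B_aux source 0
  simpa using this.symm
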